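-- pv_equiv track=rewrite | github.com/wan-catherine/Leetcode | problems/N1938_Maximum_Genetic_Difference_Query.py | maxGeneticDifference
-- ===== SOURCE A (Python) =====
-- import collections
-- from typing import List
--
-- class Trie:
--     def __init__(self):
--         self.next = [None, None]
--         self.cnt = 0
--
-- def maxGeneticDifference(parents: List[int], queries: List[List[int]]) -> List[int]:
--     mq = collections.defaultdict(list)
--     for idx, li in enumerate(queries):
--         mq[li[0]].append((idx, li[1]))
--     children = collections.defaultdict(list)
--     top = None
--     for idx, p in enumerate(parents):
--         if p == -1:
--             top = idx
--         else:
--             children[p].append(idx)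
--     length = len(queries)
--     res = [0] * length
--     root = Trie()
--     def dfs(val):
--         cur = root
--         for i in range(31, -1, -1):
--             d = (val >> i) & 1
--             if not cur.next[d]:
--                 cur.next[d] = Trie()
--             cur = cur.next[d]
--             cur.cnt += 1
--         for idx, v in mq[val]:
--             ans = 0
--             cur = root
--             for i in range(31, -1, -1):
--                 ans = ans * 2
--                 d = (v >> i) & 1
--                 # here must check cur.next[1-d].cnt, not cur.cnt
--                 if not cur.next[1-d] or cur.next[1-d].cnt == 0:
--                     cur = cur.next[d]
--                     ans += d
--                 else:
--                     cur = cur.next[1-d]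
--                     ans += 1 - d
--             res[idx] = v ^ ans
--
--         for child in children[val]:
--             dfs(child)
--
--         cur = root
--         for i in range(31, -1, -1):
--             d = (val >> i) & 1
--             cur = cur.next[d]
--             cur.cnt -= 1
--     dfs(top)
--     return res
-- ===== SOURCE B (Python) =====
-- import collections
-- from typing import List
--
--
-- def maxGeneticDifference(parents: List[int], queries: List[List[int]]) -> List[int]:
--     mq = collections.defaultdict(list)
--     for idx, li in enumerate(queries):
--         mq[li[0]].append((idx, li[1]))
--     children = collections.defaultdict(list)
--     top = None
--     for idx, p in enumerate(parents):
--         if p == -1: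
--             top = idx
--         else:
--             children[p].append(idx)
--     res = [0] * len(queries)
--     # flat counter keyed by (bit index, path prefix) instead of a pointer trie
--     cnt = collections.defaultdict(int)
--     # explicit stack instead of recursion; False = enter, True = exit
--     stack = [(top, False)]
--     while stack:
--         val, leaving = stack.pop()
--         if leaving:
--             p = 0
--             for i in range(31, -1, -1):
--                 p = 2 * p + ((val >> i) & 1)
--                 cnt[(i, p)] -= 1
--             continue
--         p = 0
--         for i in range(31, -1, -1):
--             p = 2 * p + ((val >> i) & 1)
--             cnt[(i, p)] += 1
--         for idx, v in mq[val]: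
--             p = 0
--             for i in range(31, -1, -1):
--                 b = 1 - ((v >> i) & 1)
--                 if cnt[(i, 2 * p + b)] == 0:
--                     b = 1 - b
--                 p = 2 * p + b
--             res[idx] = v ^ p
--         stack.append((val, True))
--         for child in reversed(children[val]):
--             stack.append((child, False))
--     return res
-- ===== Notes on version B (the rewrite author's own statement) =====
-- stated objective: alternative
-- what changed: The pointer trie with per-node cnt is replaced by a flat counter dict keyed by (bit index, path prefix), and the recursive DFS by an explicit stack of enter/exit frames; queries walk prefixes arithmetically instead of following node pointers.
import Mathlib
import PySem

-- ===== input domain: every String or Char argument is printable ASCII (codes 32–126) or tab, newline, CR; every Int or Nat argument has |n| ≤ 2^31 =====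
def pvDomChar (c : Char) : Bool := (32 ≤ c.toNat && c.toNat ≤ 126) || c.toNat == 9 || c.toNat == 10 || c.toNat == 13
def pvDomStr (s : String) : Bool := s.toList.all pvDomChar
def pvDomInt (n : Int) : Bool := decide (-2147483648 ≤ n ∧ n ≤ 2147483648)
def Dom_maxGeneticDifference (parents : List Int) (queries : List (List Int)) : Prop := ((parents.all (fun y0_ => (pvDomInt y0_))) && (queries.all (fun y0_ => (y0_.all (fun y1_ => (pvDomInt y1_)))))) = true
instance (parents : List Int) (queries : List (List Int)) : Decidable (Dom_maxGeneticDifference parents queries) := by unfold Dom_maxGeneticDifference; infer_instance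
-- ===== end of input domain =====

-- B replaces A's pointer trie (per-node cnt) by a flat counter dict keyed by
-- (bit index, path prefix) and A's recursive DFS by an explicit stack of
-- enter/exit frames; objective: alternative (same asymptotic cost).

-- ----- helpers shared by both ports: both Pythons build mq/children/top with the
-- ----- same two loops, and both read bit i of v as (v >> i) & 1.

-- (val >> i) & 1
def pvBit (v : Int) (i : Nat) : Int := PySem.Int.band (v >>> i) 1

-- mq = defaultdict(list); for idx, li in enumerate(queries): mq[li[0]].append((idx, li[1]))
-- (li[0]/li[1] on a short row raise IndexError in Python — excluded by Pre_; 0-default here)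
def buildMq (queries : List (List Int)) : PySem.Dict Int (List (Int × Int)) :=
  (PySem.List.enumerate queries 0).foldl
    (fun d p =>
      let key := PySem.List.pyGetD p.2 0 0
      d.insert key (d.getD key [] ++ [(p.1, PySem.List.pyGetD p.2 1 0)]))
    PySem.Dict.empty

-- children = defaultdict(list); top = None; for idx, p in enumerate(parents): …
def buildTree (parents : List Int) : PySem.Dict Int (List Int) × Option Int :=
  (PySem.List.enumerate parents 0).foldl
    (fun s p =>
      if p.2 = -1 then (s.1, some p.1)
      else (s.1.insert p.2 (s.1.getD p.2 [] ++ [p.1]), s.2))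
    (PySem.Dict.empty, none)

-- ===== PORT A =====

inductive Trie where
  | nil : Trie                                -- Python None
  | node : Trie → Trie → Int → Trie           -- next[0], next[1], cnt
deriving DecidableEq, Repr

def trChild (t : Trie) (d : Int) : Trie :=
  match t with
  | .nil => .nil
  | .node l r _ => if d = 0 then l else r

def trCnt (t : Trie) : Int :=
  match t with
  | .nil => 0
  | .node _ _ c => c

def trSet (t : Trie) (d : Int) (c : Trie) : Trie :=
  match t with
  | .nil => if d = 0 then .node c .nil 0 else .node .nil c 0
  | .node l r cnt => if d = 0 then .node c r cnt else .node l c cnt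

-- the `for i in range(31,-1,-1)` insert loop: `trInsert 32 val root`
def trInsert : Nat → Int → Trie → Trie
  | 0, _, t => t
  | k+1, val, t =>
    let d := pvBit val k
    let c := match trChild t d with            -- `if not cur.next[d]: cur.next[d] = Trie()`
      | .nil => Trie.node .nil .nil 1          -- fresh node, `cur.cnt += 1`
      | .node l r cc => Trie.node l r (cc + 1) -- `cur.cnt += 1`
    trSet t d (trInsert k val c)

-- the cleanup loop decrementing cnt along val's path (Python would raise on a missing
-- node; on every executed trace the path exists, `.nil` is just a total default)
def trRemove : Nat → Int → Trie → Trie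
  | 0, _, t => t
  | k+1, val, t =>
    let d := pvBit val k
    let c := match trChild t d with
      | .nil => Trie.nil
      | .node l r cc => Trie.node l r (cc - 1)
    trSet t d (trRemove k val c)

-- the greedy max-xor query loop: `trQuery 32 v root 0`
def trQuery : Nat → Int → Trie → Int → Int
  | 0, _, _, ans => ans
  | k+1, v, t, ans =>
    let ans := ans * 2
    let d := pvBit v k
    if trChild t (1 - d) = .nil ∨ trCnt (trChild t (1 - d)) = 0 then
      trQuery k v (trChild t d) (ans + d)
    else
      trQuery k v (trChild t (1 - d)) (ans + (1 - d))

-- state carried through the traversal: (trie, res)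
-- insert val, then answer every query (idx, v) in mq[val]:  res[idx] = v ^ ans
def enterNode (mq : PySem.Dict Int (List (Int × Int))) (val : Int)
    (st : Trie × List Int) : Trie × List Int :=
  let t := trInsert 32 val st.1
  (t, (mq.getD val []).foldl
        (fun r p => r.set p.1.toNat (PySem.Int.bxor p.2 (trQuery 32 p.2 t 0))) st.2)

def exitNode (val : Int) (st : Trie × List Int) : Trie × List Int :=
  (trRemove 32 val st.1, st.2)

-- lex facts for the fuel measure (cited by the mutual defs' decreasing_by)
theorem pvLexA (f a b : Nat) : Prod.Lex Nat.lt Nat.lt (f, a) (f + 1, b) :=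
  Prod.Lex.left _ _ (Nat.lt_succ_self f)
theorem pvLexB (f a : Nat) : Prod.Lex Nat.lt Nat.lt (f, 0) (f, a + 1) :=
  Prod.Lex.right _ (Nat.succ_pos a)
theorem pvLexC (x f a : Nat) : Prod.Lex Nat.lt Nat.lt (min x f, a + 1) (f, a + 2) := by
  rcases Nat.lt_or_ge (min x f) f with h | h
  · exact Prod.Lex.left _ _ h
  · rw [Nat.le_antisymm (Nat.min_le_right _ _) h]
    exact Prod.Lex.right _ (Nat.lt_succ_self _)

-- the recursive dfs; fuel (threaded: 1 unit per enter, 1 per exit) is only a totality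
-- guard — 2*len(parents)+2 units always suffice on executed traces
mutual
def dfsA (ch : PySem.Dict Int (List Int)) (mq : PySem.Dict Int (List (Int × Int))) :
    Nat → Int → Trie × List Int → (Trie × List Int) × Nat
  | 0, _, st => (st, 0)
  | f+1, v, st =>
    let r := dfsAList ch mq f (ch.getD v []) (enterNode mq v st)
    match r.2 with
    | 0 => (r.1, 0)
    | g+1 => (exitNode v r.1, g)
termination_by f _ _ => (f, 0)
decreasing_by exact pvLexA _ _ _

def dfsAList (ch : PySem.Dict Int (List Int)) (mq : PySem.Dict Int (List (Int × Int))) :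
    Nat → List Int → Trie × List Int → (Trie × List Int) × Nat
  | f, [], st => (st, f)
  | f, c :: cs, st =>
    let r := dfsA ch mq f c st
    dfsAList ch mq (min r.2 f) cs r.1
termination_by f l _ => (f, l.length + 1)
decreasing_by
  · exact pvLexB _ _
  · simp only [List.length_cons]; exact pvLexC _ _ _
end

def maxGeneticDifference (parents : List Int) (queries : List (List Int)) : List Int :=
  let mq := buildMq queries
  let ct := buildTree parents
  let res := List.replicate queries.length (0 : Int)
  match ct.2 with
  | none => res        -- Python raises TypeError on dfs(None); excluded by Pre_
  | some top => (dfsA ct.1 mq (2 * parents.length + 2) top (Trie.node .nil .nil 0, res)).1.2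

-- ===== PORT B =====
-- the counter: cnt[(i, p)] where p is the path prefix built from bits 31..i.
-- Python's defaultdict lookup cnt[(i, 2p+b)] in the query materialises a 0 entry;
-- that entry is invisible to every later getD, so the port reads with getD.

-- enter loop: p = 0; for i in 31..0: p = 2p + bit; cnt[(i,p)] += 1
def dictIns : Nat → Int → Int → PySem.Dict (Int × Int) Int → PySem.Dict (Int × Int) Int
  | 0, _, _, m => m
  | k+1, val, p, m =>
    let p' := 2 * p + pvBit val k
    dictIns k val p' (m.insert ((k : Int), p') (m.getD ((k : Int), p') 0 + 1))

-- exit loop: same walk with cnt[(i,p)] -= 1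
def dictRem : Nat → Int → Int → PySem.Dict (Int × Int) Int → PySem.Dict (Int × Int) Int
  | 0, _, _, m => m
  | k+1, val, p, m =>
    let p' := 2 * p + pvBit val k
    dictRem k val p' (m.insert ((k : Int), p') (m.getD ((k : Int), p') 0 - 1))

-- query loop: prefer the opposite bit b unless its prefix count is 0
def dictQuery : Nat → Int → PySem.Dict (Int × Int) Int → Int → Int
  | 0, _, _, p => p
  | k+1, v, m, p =>
    let b := 1 - pvBit v k
    let b' := if m.getD ((k : Int), 2 * p + b) 0 = 0 then 1 - b else b
    dictQuery k v m (2 * p + b')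

def enterNodeB (mq : PySem.Dict Int (List (Int × Int))) (val : Int)
    (st : PySem.Dict (Int × Int) Int × List Int) : PySem.Dict (Int × Int) Int × List Int :=
  let m := dictIns 32 val 0 st.1
  (m, (mq.getD val []).foldl
        (fun r q => r.set q.1.toNat (PySem.Int.bxor q.2 (dictQuery 32 q.2 m 0))) st.2)

def exitNodeB (val : Int) (st : PySem.Dict (Int × Int) Int × List Int) :
    PySem.Dict (Int × Int) Int × List Int :=
  (dictRem 32 val 0 st.1, st.2)

-- explicit stack of frames; list head = top of stack
inductive PvFrame where
  | enter : Int → PvFrame                        -- (val, False)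
  | leave : Int → PvFrame                        -- (val, True)
deriving DecidableEq, Repr

def machineB (ch : PySem.Dict Int (List Int)) (mq : PySem.Dict Int (List (Int × Int))) :
    Nat → List PvFrame → PySem.Dict (Int × Int) Int × List Int →
    PySem.Dict (Int × Int) Int × List Int
  | 0, _, st => st
  | _+1, [], st => st
  | f+1, .enter v :: k, st =>
    -- count up along v's path + answer queries, re-push (v, True), then children
    machineB ch mq f ((ch.getD v []).map .enter ++ .leave v :: k) (enterNodeB mq v st)
  | f+1, .leave v :: k, st =>
    machineB ch mq f k (exitNodeB v st)

def maxGeneticDifference_alt (parents : List Int) (queries : List (List Int)) : List Int :=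
  let mq := buildMq queries
  let ct := buildTree parents
  let res := List.replicate queries.length (0 : Int)
  match ct.2 with
  | none => res
  | some top =>
    (machineB ct.1 mq (2 * parents.length + 2) [.enter top] (PySem.Dict.empty, res)).2

-- ===== PRECONDITION & SPEC =====
-- Pre_ excludes exactly the inputs on which Python A raises: no -1 in parents
-- (dfs(None) → TypeError) or a query row shorter than 2 (li[0]/li[1] → IndexError).
def Pre_maxGeneticDifference (parents : List Int) (queries : List (List Int)) : Prop :=
  (-1 : Int) ∈ parents ∧ ∀ q ∈ queries, 2 ≤ q.length

instance (parents : List Int) (queries : List (List Int)) :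
    Decidable (Pre_maxGeneticDifference parents queries) := by
  unfold Pre_maxGeneticDifference; infer_instance

def pvWitness_maxGeneticDifference : List Int × List (List Int) :=
  ([-1, 0, 0], [[1, 5], [2, 3]])

def Spec_maxGeneticDifference (parents : List Int) (queries : List (List Int)) (out : List Int) : Prop := out = maxGeneticDifference_alt parents queries
instance (parents : List Int) (queries : List (List Int)) (out : List Int) : Decidable (Spec_maxGeneticDifference parents queries out) := by unfold Spec_maxGeneticDifference; infer_instance

-- ===== CLAIM (what is proved, stated in full; the proofs are below) =====
def Claim_equal_maxGeneticDifference : Prop := ∀ (parents : List Int) (queries : List (List Int)), Dom_maxGeneticDifference parents queries → Pre_maxGeneticDifference parents queries → Spec_maxGeneticDifference parents queries (maxGeneticDifference parents queries)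

-- ===== LEMMAS AND PROOFS =====

-- proof-only middle form: the RECURSIVE dfs over B's dict state; machineB is proved
-- equal to it by a stack/recursion bisimulation, and it is proved equal to dfsA by
-- a trie/counter abstraction over the multiset of currently inserted values.
mutual
def dfsM (ch : PySem.Dict Int (List Int)) (mq : PySem.Dict Int (List (Int × Int))) :
    Nat → Int → PySem.Dict (Int × Int) Int × List Int →
    (PySem.Dict (Int × Int) Int × List Int) × Nat
  | 0, _, st => (st, 0)
  | f+1, v, st =>
    let r := dfsMList ch mq f (ch.getD v []) (enterNodeB mq v st)
    match r.2 with
    | 0 => (r.1, 0)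
    | g+1 => (exitNodeB v r.1, g)
termination_by f _ _ => (f, 0)
decreasing_by exact pvLexA _ _ _

def dfsMList (ch : PySem.Dict Int (List Int)) (mq : PySem.Dict Int (List (Int × Int))) :
    Nat → List Int → PySem.Dict (Int × Int) Int × List Int →
    (PySem.Dict (Int × Int) Int × List Int) × Nat
  | f, [], st => (st, f)
  | f, c :: cs, st =>
    let r := dfsM ch mq f c st
    dfsMList ch mq (min r.2 f) cs r.1
termination_by f l _ => (f, l.length + 1)
decreasing_by
  · exact pvLexB _ _
  · simp only [List.length_cons]; exact pvLexC _ _ _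
end

theorem dfsMList_fuel_le (ch : PySem.Dict Int (List Int)) (mq : PySem.Dict Int (List (Int × Int)))
    (cs : List Int) : ∀ (f : Nat) (st : PySem.Dict (Int × Int) Int × List Int),
    (dfsMList ch mq f cs st).2 ≤ f := by
  induction cs with
  | nil => intro f st; simp [dfsMList]
  | cons c cs ih =>
    intro f st
    simp only [dfsMList]
    exact le_trans (ih _ _) (Nat.min_le_right _ _)

theorem dfsM_fuel_le (ch : PySem.Dict Int (List Int)) (mq : PySem.Dict Int (List (Int × Int)))
    (f : Nat) (v : Int) (st : PySem.Dict (Int × Int) Int × List Int) :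
    (dfsM ch mq f v st).2 ≤ f := by
  cases f with
  | zero => simp [dfsM]
  | succ f =>
    simp only [dfsM]
    have h := dfsMList_fuel_le ch mq (ch.getD v []) f (enterNodeB mq v st)
    cases hr : (dfsMList ch mq f (ch.getD v []) (enterNodeB mq v st)).2 with
    | zero => simp
    | succ g => simp; rw [hr] at h; omega

theorem dfsAList_fuel_le (ch : PySem.Dict Int (List Int)) (mq : PySem.Dict Int (List (Int × Int)))
    (cs : List Int) : ∀ (f : Nat) (st : Trie × List Int), (dfsAList ch mq f cs st).2 ≤ f := by
  induction cs with
  | nil => intro f st; simp [dfsAList]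
  | cons c cs ih =>
    intro f st
    simp only [dfsAList]
    exact le_trans (ih _ _) (Nat.min_le_right _ _)

theorem dfsA_fuel_le (ch : PySem.Dict Int (List Int)) (mq : PySem.Dict Int (List (Int × Int)))
    (f : Nat) (v : Int) (st : Trie × List Int) : (dfsA ch mq f v st).2 ≤ f := by
  cases f with
  | zero => simp [dfsA]
  | succ f =>
    simp only [dfsA]
    have h := dfsAList_fuel_le ch mq (ch.getD v []) f (enterNode mq v st)
    cases hr : (dfsAList ch mq f (ch.getD v []) (enterNode mq v st)).2 with
    | zero => simp
    | succ g => simp; rw [hr] at h; omega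

theorem dfsAList_cons (ch : PySem.Dict Int (List Int)) (mq : PySem.Dict Int (List (Int × Int)))
    (f : Nat) (c : Int) (cs : List Int) (st : Trie × List Int) :
    dfsAList ch mq f (c :: cs) st
      = dfsAList ch mq (dfsA ch mq f c st).2 cs (dfsA ch mq f c st).1 := by
  simp only [dfsAList, Nat.min_eq_left (dfsA_fuel_le ch mq f c st)]

theorem dfsMList_cons (ch : PySem.Dict Int (List Int)) (mq : PySem.Dict Int (List (Int × Int)))
    (f : Nat) (c : Int) (cs : List Int) (st : PySem.Dict (Int × Int) Int × List Int) :
    dfsMList ch mq f (c :: cs) st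
      = dfsMList ch mq (dfsM ch mq f c st).2 cs (dfsM ch mq f c st).1 := by
  simp only [dfsMList, Nat.min_eq_left (dfsM_fuel_le ch mq f c st)]

-- the stack/recursion bisimulation: enter-frames behave like recursive dfsM calls
theorem machineB_dfsMList (ch : PySem.Dict Int (List Int))
    (mq : PySem.Dict Int (List (Int × Int))) :
    ∀ (f : Nat), ∀ (cs : List Int) (f' : Nat), f' ≤ f →
      ∀ (k : List PvFrame) (st : PySem.Dict (Int × Int) Int × List Int),
        machineB ch mq f' (cs.map .enter ++ k) st
          = machineB ch mq (dfsMList ch mq f' cs st).2 k (dfsMList ch mq f' cs st).1 := by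
  intro f
  induction f using Nat.strong_induction_on with
  | _ f IH =>
    have hL1 : ∀ (f'' : Nat), f'' ≤ f → ∀ (v : Int) (k : List PvFrame)
        (st : PySem.Dict (Int × Int) Int × List Int),
        machineB ch mq f'' (.enter v :: k) st
          = machineB ch mq (dfsM ch mq f'' v st).2 k (dfsM ch mq f'' v st).1 := by
      intro f'' hf'' v k st
      cases f'' with
      | zero => simp [machineB, dfsM]
      | succ g =>
        simp only [machineB, dfsM]
        have hg : g < f := by omega
        rw [IH g hg (ch.getD v []) g (le_refl g) (.leave v :: k) (enterNodeB mq v st)]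
        cases hr : (dfsMList ch mq g (ch.getD v []) (enterNodeB mq v st)).2 with
        | zero => simp [machineB]
        | succ g' => simp [machineB]
    intro cs
    induction cs with
    | nil => intro f' hf' k st; simp [dfsMList]
    | cons c cs ihcs =>
      intro f' hf' k st
      have h1 := hL1 f' hf' c ((cs.map .enter) ++ k) st
      simp only [List.map_cons, List.cons_append] at h1 ⊢
      rw [h1, dfsMList_cons]
      exact ihcs (dfsM ch mq f' c st).2 (le_trans (dfsM_fuel_le ch mq f' c st) hf') k _

theorem machineB_nil (ch : PySem.Dict Int (List Int)) (mq : PySem.Dict Int (List (Int × Int)))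
    (f : Nat) (st : PySem.Dict (Int × Int) Int × List Int) : machineB ch mq f [] st = st := by
  cases f <;> simp [machineB]

-- ---------- the trie / counter-dict abstraction ----------

theorem pvBit_cases (v : Int) (k : Nat) : pvBit v k = 0 ∨ pvBit v k = 1 := by
  unfold pvBit
  rw [PySem.Int.band_one]
  have h1 := PySem.Int.mod_nonneg (v >>> k) (b := 2) (by norm_num)
  have h2 := PySem.Int.mod_lt (v >>> k) (b := 2) (by norm_num)
  omega

-- path prefix of the first n bits of s (bits 31 down to 32-n)
def prefTake (s : Int) : Nat → Int
  | 0 => 0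
  | n+1 => 2 * prefTake s n + pvBit s (31 - n)

-- number of currently-present values whose n-bit prefix is q
def cntOfD (S : List Int) (n : Nat) (q : Int) : Int :=
  ((S.filter (fun s => prefTake s n == q)).length : Int)

theorem cntOfD_nonneg (S : List Int) (n : Nat) (q : Int) : 0 ≤ cntOfD S n q :=
  Int.natCast_nonneg _

theorem cntOfD_cons (v : Int) (S : List Int) (n : Nat) (q : Int) :
    cntOfD (v :: S) n q = cntOfD S n q + (if prefTake v n = q then 1 else 0) := by
  simp only [cntOfD, List.filter_cons]
  by_cases h : prefTake v n = q
  · simp [h]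
  · simp [h]

theorem cntOfD_append (E S : List Int) (n : Nat) (q : Int) :
    cntOfD (E ++ S) n q = cntOfD E n q + cntOfD S n q := by
  simp [cntOfD, List.filter_append]

theorem cntOfD_middle (E : List Int) (v : Int) (S : List Int) (n : Nat) (q : Int) :
    cntOfD (E ++ v :: S) n q = cntOfD (v :: (E ++ S)) n q := by
  rw [cntOfD_append, cntOfD_cons, cntOfD_cons, cntOfD_append]; ring

theorem pvShr1 (q : Int) (a : Nat) : q >>> (a + 1) = (q >>> a) >>> (1 : Nat) := by
  rw [Int.shiftRight_eq_div_pow, Int.shiftRight_eq_div_pow, Int.shiftRight_eq_div_pow,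
    Int.ediv_ediv_of_nonneg (by positivity)]
  norm_num [pow_succ]

theorem pvHalf (p b : Int) (hb : b = 0 ∨ b = 1) : (2 * p + b) >>> (1 : Nat) = p := by
  rw [Int.shiftRight_eq_div_pow]; rcases hb with h | h <;> subst h <;> omega

theorem pvShrAdd (q : Int) (a b : Nat) : q >>> (a + b) = (q >>> a) >>> b := by
  induction b with
  | zero => simp [Int.shiftRight_eq_div_pow]
  | succ b ih => rw [← Nat.add_assoc, pvShr1, ih, ← pvShr1]

theorem prefTake_step (val : Int) (n : Nat) :
    prefTake val (n + 1) = 2 * prefTake val n + pvBit val (31 - n) := rfl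

theorem prefTake_shift (val : Int) : ∀ (m n : Nat), prefTake val (n + m) >>> m = prefTake val n := by
  intro m
  induction m with
  | zero => intro n; simp [Int.shiftRight_eq_div_pow]
  | succ m ih =>
    intro n
    have h1 : n + (m + 1) = (n + m) + 1 := by omega
    rw [h1, prefTake_step, Nat.add_comm m 1, pvShrAdd,
      pvHalf _ _ (pvBit_cases val (31 - (n + m))), ih]

-- the abstraction of a trie subtree at prefix p with k bit levels remaining
def TAbs : Nat → Int → Trie → List Int → Prop
  | 0, _, _, _ => True
  | k+1, p, t, S =>
      (trCnt (trChild t 0) = cntOfD S (32 - k) (2 * p)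
        ∧ TAbs k (2 * p) (trChild t 0) S)
    ∧ (trCnt (trChild t 1) = cntOfD S (32 - k) (2 * p + 1)
        ∧ TAbs k (2 * p + 1) (trChild t 1) S)

-- the abstraction of the counter dict
def MAbs (m : PySem.Dict (Int × Int) Int) (S : List Int) : Prop :=
  ∀ (i : Nat) (q : Int), i < 32 → m.getD ((i : Int), q) 0 = cntOfD S (32 - i) q

theorem TAbs_nil (S : List Int) (h : ∀ n q, cntOfD S n q = 0) :
    ∀ (k : Nat) (p : Int), TAbs k p Trie.nil S := by
  intro k
  induction k with
  | zero => intro p; trivial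
  | succ k ih => intro p; exact ⟨⟨(h _ _).symm, ih _⟩, ⟨(h _ _).symm, ih _⟩⟩

theorem TAbs_children (k : Nat) (p : Int) (t t' : Trie) (S : List Int)
    (h0 : trChild t 0 = trChild t' 0) (h1 : trChild t 1 = trChild t' 1) :
    TAbs k p t S → TAbs k p t' S := by
  cases k with
  | zero => intro; trivial
  | succ k => intro h; unfold TAbs at h ⊢; rw [← h0, ← h1]; exact h

-- TAbs reads only prefixes extending p; congruence over that read set
theorem TAbs_congr : ∀ (k : Nat) (p : Int) (t : Trie) (S S' : List Int),
    (∀ (i : Nat) (q : Int), i < k →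
      (q >>> (k - 1 - i) = 2 * p ∨ q >>> (k - 1 - i) = 2 * p + 1) →
      cntOfD S (32 - i) q = cntOfD S' (32 - i) q) →
    TAbs k p t S → TAbs k p t S' := by
  intro k
  induction k with
  | zero => intro p t S S' _ _; trivial
  | succ k ih =>
    intro p t S S' h hT
    have hdesc : ∀ (d : Int), d = 0 ∨ d = 1 → ∀ (i : Nat) (q : Int), i < k →
        (q >>> (k - 1 - i) = 2 * (2 * p + d) ∨ q >>> (k - 1 - i) = 2 * (2 * p + d) + 1) →
        cntOfD S (32 - i) q = cntOfD S' (32 - i) q := by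
      intro d hd i q hi hq
      refine h i q (by omega) ?_
      have hki : k + 1 - 1 - i = (k - 1 - i) + 1 := by omega
      have hv : q >>> (k + 1 - 1 - i) = (q >>> (k - 1 - i)) >>> (1 : Nat) := by
        rw [hki, pvShr1]
      rcases hq with hq | hq <;> rw [hv, hq]
      · have : 2 * (2 * p + d) = 2 * (2 * p + d) + 0 := by ring
        rw [this, pvHalf _ _ (Or.inl rfl)]
        rcases hd with h | h <;> subst h <;> [left; right] <;> ring
      · rw [pvHalf _ _ (Or.inr rfl)]
        rcases hd with h | h <;> subst h <;> [left; right] <;> ring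
    obtain ⟨⟨hc0, hr0⟩, hc1, hr1⟩ := hT
    have h0 := h k (2 * p) (by omega) (by left; simp [Int.shiftRight_eq_div_pow])
    have h1 := h k (2 * p + 1) (by omega) (by right; simp [Int.shiftRight_eq_div_pow])
    exact ⟨⟨by rw [hc0, h0], ih (2 * p) _ S S'
              (by simpa using hdesc 0 (Or.inl rfl)) hr0⟩,
           ⟨by rw [hc1, h1], ih (2 * p + 1) _ S S' (hdesc 1 (Or.inr rfl)) hr1⟩⟩

theorem TAbs_perm (k : Nat) (p : Int) (t : Trie) (S S' : List Int)
    (h : ∀ n q, cntOfD S n q = cntOfD S' n q) : TAbs k p t S → TAbs k p t S' :=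
  TAbs_congr k p t S S' (fun _ q _ _ => h _ q)

theorem MAbs_perm (m : PySem.Dict (Int × Int) Int) (S S' : List Int)
    (h : ∀ n q, cntOfD S n q = cntOfD S' n q) (hM : MAbs m S) : MAbs m S' := by
  intro i q hi; rw [hM i q hi, h]

theorem trCnt_set (t : Trie) (d : Int) (c : Trie) : trCnt (trSet t d c) = trCnt t := by
  cases t <;> by_cases hd : d = 0 <;> simp [trSet, trCnt, hd]

theorem trChild_set_same (t : Trie) (d : Int) (c : Trie) (hd : d = 0 ∨ d = 1) :
    trChild (trSet t d c) d = c := by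
  rcases hd with h | h <;> subst h <;> cases t <;> simp [trSet, trChild]

theorem trChild_set_other (t : Trie) (d d' : Int) (c : Trie)
    (hd : d = 0 ∨ d = 1) (hd' : d' = 0 ∨ d' = 1) (hne : d ≠ d') :
    trChild (trSet t d c) d' = trChild t d' := by
  rcases hd with h | h <;> rcases hd' with h' | h' <;> subst h <;> subst h' <;>
    first | (exact absurd rfl hne) | (cases t <;> simp [trSet, trChild])

theorem trInsert_cnt (k : Nat) (val : Int) (t : Trie) :
    trCnt (trInsert k val t) = trCnt t := by
  cases k with
  | zero => rfl
  | succ k => simp only [trInsert]; rw [trCnt_set]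

theorem trRemove_cnt (k : Nat) (val : Int) (t : Trie) :
    trCnt (trRemove k val t) = trCnt t := by
  cases k with
  | zero => rfl
  | succ k => simp only [trRemove]; rw [trCnt_set]

-- the step identity for the aligned prefix
theorem prefTake_key (k : Nat) (val : Int) (hk : k + 1 ≤ 32) :
    prefTake val (32 - k) = 2 * prefTake val (32 - (k + 1)) + pvBit val k := by
  have h1 : 32 - k = (32 - (k + 1)) + 1 := by omega
  have h2 : 31 - (32 - (k + 1)) = k := by omega
  rw [h1, prefTake_step, h2]

-- val's path prefixes stay outside the subtree of the sibling d' ≠ d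
theorem off_path (k : Nat) (p val d d' : Int) (hk : k + 1 ≤ 32)
    (hkey : prefTake val (32 - k) = 2 * p + d)
    (hd : d = 0 ∨ d = 1) (hd' : d' = 0 ∨ d' = 1) (hne : d ≠ d') :
    ∀ (i : Nat) (q : Int), i < k →
      (q >>> (k - 1 - i) = 2 * (2 * p + d') ∨ q >>> (k - 1 - i) = 2 * (2 * p + d') + 1) →
      prefTake val (32 - i) ≠ q := by
  intro i q hi hq he
  subst he
  have h32 : 32 - i = (33 - k) + (k - 1 - i) := by omega
  have hsh : prefTake val (32 - i) >>> (k - 1 - i) = prefTake val (33 - k) := by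
    rw [h32, prefTake_shift]
  have h33 : 33 - k = (32 - k) + 1 := by omega
  have hstep : prefTake val (33 - k)
      = 2 * prefTake val (32 - k) + pvBit val (31 - (32 - k)) := by
    rw [h33, prefTake_step]
  have hb := pvBit_cases val (31 - (32 - k))
  rw [hsh, hstep, hkey] at hq
  rcases hb with hb | hb <;> rw [hb] at hq <;> rcases hd with h | h <;>
    rcases hd' with h' | h' <;> subst h <;> subst h' <;> omega

theorem cons_off (k : Nat) (p val d d' : Int) (S : List Int) (hk : k + 1 ≤ 32)
    (hkey : prefTake val (32 - k) = 2 * p + d)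
    (hd : d = 0 ∨ d = 1) (hd' : d' = 0 ∨ d' = 1) (hne : d ≠ d') :
    ∀ (i : Nat) (q : Int), i < k →
      (q >>> (k - 1 - i) = 2 * (2 * p + d') ∨ q >>> (k - 1 - i) = 2 * (2 * p + d') + 1) →
      cntOfD (val :: S) (32 - i) q = cntOfD S (32 - i) q := by
  intro i q hi hq
  rw [cntOfD_cons, if_neg (off_path k p val d d' hk hkey hd hd' hne i q hi hq)]
  ring

theorem TAbs_insert : ∀ (k : Nat) (p val : Int) (t : Trie) (S : List Int),
    k ≤ 32 → p = prefTake val (32 - k) → TAbs k p t S →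
    TAbs k p (trInsert k val t) (val :: S) := by
  intro k
  induction k with
  | zero => intro p val t S _ _ _; trivial
  | succ k ih =>
    intro p val t S hk hp hT
    have hkey : prefTake val (32 - k) = 2 * p + pvBit val k := by
      rw [prefTake_key k val hk, ← hp]
    obtain ⟨⟨hc0, hr0⟩, hc1, hr1⟩ := hT
    simp only [trInsert]
    rcases pvBit_cases val k with hd | hd <;> rw [hd] <;> rw [hd] at hkey
    · -- d = 0
      refine ⟨⟨?_, ?_⟩, ?_, ?_⟩
      · rw [trChild_set_same _ _ _ (Or.inl rfl), trInsert_cnt, cntOfD_cons,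
          if_pos (by rw [hkey]; ring)]
        cases hch : trChild t 0 <;> rw [hch] at hc0 <;>
          simp only [trCnt] at hc0 ⊢ <;> omega
      · rw [trChild_set_same _ _ _ (Or.inl rfl)]
        refine ih (2 * p) val _ S (by omega) (by rw [hkey]; ring) ?_
        refine TAbs_children k (2 * p) (trChild t 0) _ S ?_ ?_ hr0 <;>
          cases hch : trChild t 0 <;> simp [trChild]
      · rw [trChild_set_other _ _ _ _ (Or.inl rfl) (Or.inr rfl) (by norm_num), hc1,
          cntOfD_cons, if_neg (by rw [hkey]; omega)]
        ring
      · rw [trChild_set_other _ _ _ _ (Or.inl rfl) (Or.inr rfl) (by norm_num)]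
        refine TAbs_congr k (2 * p + 1) _ S (val :: S) ?_ hr1
        intro i q hi hq
        exact (cons_off k p val 0 1 S hk hkey (Or.inl rfl) (Or.inr rfl)
          (by norm_num) i q hi hq).symm
    · -- d = 1
      refine ⟨⟨?_, ?_⟩, ?_, ?_⟩
      · rw [trChild_set_other _ _ _ _ (Or.inr rfl) (Or.inl rfl) (by norm_num), hc0,
          cntOfD_cons, if_neg (by rw [hkey]; omega)]
        ring
      · rw [trChild_set_other _ _ _ _ (Or.inr rfl) (Or.inl rfl) (by norm_num)]
        refine TAbs_congr k (2 * p) _ S (val :: S) ?_ hr0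
        intro i q hi hq
        exact (cons_off k p val 1 0 S hk hkey (Or.inr rfl) (Or.inl rfl)
          (by norm_num) i q hi (by simpa using hq)).symm
      · rw [trChild_set_same _ _ _ (Or.inr rfl), trInsert_cnt, cntOfD_cons,
          if_pos (by rw [hkey])]
        cases hch : trChild t 1 <;> rw [hch] at hc1 <;>
          simp only [trCnt] at hc1 ⊢ <;> omega
      · rw [trChild_set_same _ _ _ (Or.inr rfl)]
        refine ih (2 * p + 1) val _ S (by omega) (by rw [hkey]) ?_
        refine TAbs_children k (2 * p + 1) (trChild t 1) _ S ?_ ?_ hr1 <;>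
          cases hch : trChild t 1 <;> simp [trChild]

theorem TAbs_remove : ∀ (k : Nat) (p val : Int) (t : Trie) (S : List Int),
    k ≤ 32 → p = prefTake val (32 - k) → TAbs k p t (val :: S) →
    TAbs k p (trRemove k val t) S := by
  intro k
  induction k with
  | zero => intro p val t S _ _ _; trivial
  | succ k ih =>
    intro p val t S hk hp hT
    have hkey : prefTake val (32 - k) = 2 * p + pvBit val k := by
      rw [prefTake_key k val hk, ← hp]
    obtain ⟨⟨hc0, hr0⟩, hc1, hr1⟩ := hT
    simp only [trRemove]
    have hnn := cntOfD_nonneg S (32 - k)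
    rcases pvBit_cases val k with hd | hd <;> rw [hd] <;> rw [hd] at hkey
    · -- d = 0
      rw [cntOfD_cons, if_pos (by rw [hkey]; ring)] at hc0
      cases hch : trChild t 0 with
      | nil => rw [hch] at hc0; simp only [trCnt] at hc0
               exact absurd hc0 (by have := hnn (2 * p); omega)
      | node l r cc =>
        rw [hch] at hc0 hr0
        simp only [trCnt] at hc0
        refine ⟨⟨?_, ?_⟩, ?_, ?_⟩
        · rw [trChild_set_same _ _ _ (Or.inl rfl), trRemove_cnt]
          simp only [trCnt]; omega
        · rw [trChild_set_same _ _ _ (Or.inl rfl)]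
          refine ih (2 * p) val _ S (by omega) (by rw [hkey]; ring) ?_
          exact TAbs_children k (2 * p) (Trie.node l r cc) _ (val :: S) rfl rfl hr0
        · rw [trChild_set_other _ _ _ _ (Or.inl rfl) (Or.inr rfl) (by norm_num), hc1,
            cntOfD_cons, if_neg (by rw [hkey]; omega)]
          ring
        · rw [trChild_set_other _ _ _ _ (Or.inl rfl) (Or.inr rfl) (by norm_num)]
          refine TAbs_congr k (2 * p + 1) _ (val :: S) S ?_ hr1
          intro i q hi hq
          exact cons_off k p val 0 1 S hk hkey (Or.inl rfl) (Or.inr rfl)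
            (by norm_num) i q hi hq
    · -- d = 1
      rw [cntOfD_cons, if_pos (by rw [hkey])] at hc1
      cases hch : trChild t 1 with
      | nil => rw [hch] at hc1; simp only [trCnt] at hc1
               exact absurd hc1 (by have := hnn (2 * p + 1); omega)
      | node l r cc =>
        rw [hch] at hc1 hr1
        simp only [trCnt] at hc1
        refine ⟨⟨?_, ?_⟩, ?_, ?_⟩
        · rw [trChild_set_other _ _ _ _ (Or.inr rfl) (Or.inl rfl) (by norm_num), hc0,
            cntOfD_cons, if_neg (by rw [hkey]; omega)]
          ring
        · rw [trChild_set_other _ _ _ _ (Or.inr rfl) (Or.inl rfl) (by norm_num)]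
          refine TAbs_congr k (2 * p) _ (val :: S) S ?_ hr0
          intro i q hi hq
          exact cons_off k p val 1 0 S hk hkey (Or.inr rfl) (Or.inl rfl)
            (by norm_num) i q hi (by simpa using hq)
        · rw [trChild_set_same _ _ _ (Or.inr rfl), trRemove_cnt]
          simp only [trCnt]; omega
        · rw [trChild_set_same _ _ _ (Or.inr rfl)]
          refine ih (2 * p + 1) val _ S (by omega) (by rw [hkey]) ?_
          exact TAbs_children k (2 * p + 1) (Trie.node l r cc) _ (val :: S) rfl rfl hr1

theorem dictIns_getD : ∀ (k : Nat) (val p : Int) (m : PySem.Dict (Int × Int) Int),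
    k ≤ 32 → p = prefTake val (32 - k) → ∀ (i : Nat) (q : Int),
    (dictIns k val p m).getD ((i : Int), q) 0
      = m.getD ((i : Int), q) 0 + (if i < k ∧ q = prefTake val (32 - i) then 1 else 0) := by
  intro k
  induction k with
  | zero => intro val p m _ _ i q; simp [dictIns]
  | succ k ih =>
    intro val p m hk hp i q
    have hkey : prefTake val (32 - k) = 2 * p + pvBit val k := by
      rw [prefTake_key k val hk, ← hp]
    simp only [dictIns]
    rw [ih val (2 * p + pvBit val k) _ (by omega) hkey.symm i q,
      PySem.Dict.getD_insert]
    by_cases hiq : ((i : Int), q) = ((k : Int), 2 * p + pvBit val k)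
    · obtain ⟨hi1, hq1⟩ := Prod.mk.injEq .. ▸ hiq
      have hik : i = k := by exact_mod_cast hi1
      subst hik
      rw [if_pos hiq, if_neg (by omega), if_pos ⟨by omega, by rw [hq1, ← hkey]⟩,
        hq1]
      omega
    · rw [if_neg hiq]
      congr 1
      by_cases h1 : i < k ∧ q = prefTake val (32 - i)
      · rw [if_pos h1, if_pos ⟨by omega, h1.2⟩]
      · rw [if_neg h1]
        by_cases h2 : i < k + 1 ∧ q = prefTake val (32 - i)
        · exfalso
          have hik : i = k := by
            rcases Nat.lt_or_ge i k with h | h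
            · exact absurd ⟨h, h2.2⟩ h1
            · omega
          subst hik
          exact hiq (by rw [h2.2, hkey])
        · rw [if_neg h2]

theorem dictRem_getD : ∀ (k : Nat) (val p : Int) (m : PySem.Dict (Int × Int) Int),
    k ≤ 32 → p = prefTake val (32 - k) → ∀ (i : Nat) (q : Int),
    (dictRem k val p m).getD ((i : Int), q) 0
      = m.getD ((i : Int), q) 0 - (if i < k ∧ q = prefTake val (32 - i) then 1 else 0) := by
  intro k
  induction k with
  | zero => intro val p m _ _ i q; simp [dictRem]
  | succ k ih =>
    intro val p m hk hp i q
    have hkey : prefTake val (32 - k) = 2 * p + pvBit val k := by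
      rw [prefTake_key k val hk, ← hp]
    simp only [dictRem]
    rw [ih val (2 * p + pvBit val k) _ (by omega) hkey.symm i q,
      PySem.Dict.getD_insert]
    by_cases hiq : ((i : Int), q) = ((k : Int), 2 * p + pvBit val k)
    · obtain ⟨hi1, hq1⟩ := Prod.mk.injEq .. ▸ hiq
      have hik : i = k := by exact_mod_cast hi1
      subst hik
      rw [if_pos hiq, if_neg (by omega), if_pos ⟨by omega, by rw [hq1, ← hkey]⟩,
        hq1]
      omega
    · rw [if_neg hiq]
      congr 1
      by_cases h1 : i < k ∧ q = prefTake val (32 - i)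
      · rw [if_pos h1, if_pos ⟨by omega, h1.2⟩]
      · rw [if_neg h1]
        by_cases h2 : i < k + 1 ∧ q = prefTake val (32 - i)
        · exfalso
          have hik : i = k := by
            rcases Nat.lt_or_ge i k with h | h
            · exact absurd ⟨h, h2.2⟩ h1
            · omega
          subst hik
          exact hiq (by rw [h2.2, hkey])
        · rw [if_neg h2]

theorem MAbs_ins (m : PySem.Dict (Int × Int) Int) (S : List Int) (val : Int)
    (h : MAbs m S) : MAbs (dictIns 32 val 0 m) (val :: S) := by
  intro i q hi
  rw [dictIns_getD 32 val 0 m (le_refl _) rfl i q, h i q hi, cntOfD_cons]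
  by_cases he : prefTake val (32 - i) = q
  · rw [if_pos (show i < 32 ∧ q = prefTake val (32 - i) from ⟨hi, he.symm⟩), if_pos he]
  · rw [if_neg (show ¬(i < 32 ∧ q = prefTake val (32 - i)) from fun hc => he hc.2.symm),
      if_neg he]

theorem MAbs_rem (m : PySem.Dict (Int × Int) Int) (S : List Int) (val : Int)
    (h : MAbs m (val :: S)) : MAbs (dictRem 32 val 0 m) S := by
  intro i q hi
  rw [dictRem_getD 32 val 0 m (le_refl _) rfl i q, h i q hi, cntOfD_cons]
  by_cases he : prefTake val (32 - i) = q
  · rw [if_pos (show i < 32 ∧ q = prefTake val (32 - i) from ⟨hi, he.symm⟩), if_pos he]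
    ring
  · rw [if_neg (show ¬(i < 32 ∧ q = prefTake val (32 - i)) from fun hc => he hc.2.symm),
      if_neg he]
    ring

-- under the two abstractions the greedy query walks the same bits
set_option maxHeartbeats 1000000 in
theorem query_eq : ∀ (k : Nat) (v p : Int) (t : Trie) (m : PySem.Dict (Int × Int) Int)
    (S : List Int), k ≤ 32 → TAbs k p t S → MAbs m S →
    trQuery k v t p = dictQuery k v m p := by
  intro k
  induction k with
  | zero => intro v p t m S _ _ _; rfl
  | succ k ih =>
    intro v p t m S hk hT hM
    obtain ⟨⟨hc0, hr0⟩, hc1, hr1⟩ := hT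
    simp only [trQuery, dictQuery]
    rcases pvBit_cases v k with hd | hd <;> rw [hd] <;> norm_num
    · -- bit d = 0, opposite b = 1
      rw [hM k (2 * p + 1) (by omega)]
      by_cases hz : cntOfD S (32 - k) (2 * p + 1) = 0
      · rw [if_pos (Or.inr (by rw [hc1, hz])), if_pos hz, mul_comm p 2,
          show (2 * p + 0 : Int) = 2 * p by ring]
        exact ih v (2 * p) (trChild t 0) m S (by omega) hr0 hM
      · have hnil : trChild t 1 ≠ Trie.nil := by
          intro hn; rw [hn] at hc1; exact hz (by rw [← hc1]; rfl)
        rw [if_neg (by rw [hc1]; tauto), if_neg hz,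
          show p * 2 + 1 = 2 * p + 1 by ring]
        exact ih v _ _ m S (by omega) hr1 hM
    · -- bit d = 1, opposite b = 0
      rw [hM k (2 * p) (by omega)]
      by_cases hz : cntOfD S (32 - k) (2 * p) = 0
      · rw [if_pos (Or.inr (by rw [hc0, hz])), if_pos hz,
          show p * 2 + 1 = 2 * p + 1 by ring]
        exact ih v _ _ m S (by omega) hr1 hM
      · have hnil : trChild t 0 ≠ Trie.nil := by
          intro hn; rw [hn] at hc0; exact hz (by rw [← hc0]; rfl)
        rw [if_neg (by rw [hc0]; tauto), if_neg hz, mul_comm p 2,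
          show (2 * p + 0 : Int) = 2 * p by ring]
        exact ih v (2 * p) (trChild t 0) m S (by omega) hr0 hM

theorem enter_eq (mq : PySem.Dict Int (List (Int × Int))) (val : Int)
    (t : Trie) (m : PySem.Dict (Int × Int) Int) (r : List Int) (S : List Int)
    (hT : TAbs 32 0 t S) (hM : MAbs m S) :
    (enterNode mq val (t, r)).2 = (enterNodeB mq val (m, r)).2
    ∧ TAbs 32 0 (enterNode mq val (t, r)).1 (val :: S)
    ∧ MAbs (enterNodeB mq val (m, r)).1 (val :: S) := by
  have hT' : TAbs 32 0 (trInsert 32 val t) (val :: S) :=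
    TAbs_insert 32 0 val t S (le_refl _) rfl hT
  have hM' : MAbs (dictIns 32 val 0 m) (val :: S) := MAbs_ins m S val hM
  have hf : (fun (r : List Int) (p : Int × Int) =>
        r.set p.1.toNat (PySem.Int.bxor p.2 (trQuery 32 p.2 (trInsert 32 val t) 0)))
      = (fun (r : List Int) (q : Int × Int) =>
        r.set q.1.toNat (PySem.Int.bxor q.2 (dictQuery 32 q.2 (dictIns 32 val 0 m) 0))) := by
    funext r q
    rw [query_eq 32 q.2 0 (trInsert 32 val t) (dictIns 32 val 0 m) (val :: S)
      (le_refl _) hT' hM']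
  simp only [enterNode, enterNodeB]
  rw [hf]
  exact ⟨rfl, hT', hM'⟩

-- the main correspondence: dfsA over the trie ≡ dfsM over the counter dict
theorem dfsAM_list (ch : PySem.Dict Int (List Int)) (mq : PySem.Dict Int (List (Int × Int))) :
    ∀ (f : Nat), ∀ (cs : List Int) (f' : Nat), f' ≤ f →
      ∀ (t : Trie) (m : PySem.Dict (Int × Int) Int) (r : List Int) (S : List Int),
        TAbs 32 0 t S → MAbs m S →
        (dfsAList ch mq f' cs (t, r)).2 = (dfsMList ch mq f' cs (m, r)).2
        ∧ (dfsAList ch mq f' cs (t, r)).1.2 = (dfsMList ch mq f' cs (m, r)).1.2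
        ∧ ∃ E, TAbs 32 0 (dfsAList ch mq f' cs (t, r)).1.1 (E ++ S)
             ∧ MAbs (dfsMList ch mq f' cs (m, r)).1.1 (E ++ S) := by
  intro f
  induction f using Nat.strong_induction_on with
  | _ f IH =>
    have hL1 : ∀ (f'' : Nat), f'' ≤ f → ∀ (v : Int) (t : Trie)
        (m : PySem.Dict (Int × Int) Int) (r : List Int) (S : List Int),
        TAbs 32 0 t S → MAbs m S →
        (dfsA ch mq f'' v (t, r)).2 = (dfsM ch mq f'' v (m, r)).2
        ∧ (dfsA ch mq f'' v (t, r)).1.2 = (dfsM ch mq f'' v (m, r)).1.2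
        ∧ ∃ E, TAbs 32 0 (dfsA ch mq f'' v (t, r)).1.1 (E ++ S)
             ∧ MAbs (dfsM ch mq f'' v (m, r)).1.1 (E ++ S) := by
      intro f'' hf'' v t m r S hT hM
      cases f'' with
      | zero =>
        simp only [dfsA, dfsM]
        exact ⟨trivial, trivial, [], by simpa using hT, by simpa using hM⟩
      | succ g =>
        obtain ⟨he2, heT, heM⟩ := enter_eq mq v t m r S hT hM
        simp only [dfsA, dfsM]
        revert he2 heT heM
        generalize enterNode mq v (t, r) = x
        generalize enterNodeB mq v (m, r) = y
        obtain ⟨tx, rx⟩ := x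
        obtain ⟨ty, ry⟩ := y
        intro he2 heT heM
        simp only at he2 heT heM
        subst he2
        obtain ⟨hq2, hqr, E, hqT, hqM⟩ :=
          IH g (by omega) (ch.getD v []) g (le_refl g) tx ty rx (v :: S) heT heM
        rw [← hq2]
        cases hfa : (dfsAList ch mq g (ch.getD v []) (tx, rx)).2 with
        | zero =>
          refine ⟨rfl, hqr, E ++ [v], ?_, ?_⟩
          · simpa [List.append_assoc] using hqT
          · simpa [List.append_assoc] using hqM
        | succ g' =>
          refine ⟨rfl, ?_, E, ?_, ?_⟩
          · simpa [exitNode, exitNodeB] using hqr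
          · simp only [exitNode]
            exact TAbs_remove 32 0 v _ (E ++ S) (le_refl _) rfl
              (TAbs_perm 32 0 _ (E ++ v :: S) (v :: (E ++ S))
                (fun n q => cntOfD_middle E v S n q) hqT)
          · simp only [exitNodeB]
            exact MAbs_rem _ (E ++ S) v
              (MAbs_perm _ (E ++ v :: S) (v :: (E ++ S))
                (fun n q => cntOfD_middle E v S n q) hqM)
    intro cs
    induction cs with
    | nil =>
      intro f' hf' t m r S hT hM
      simp only [dfsAList, dfsMList]
      exact ⟨trivial, trivial, [], by simpa using hT, by simpa using hM⟩
    | cons c cs ihcs =>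
      intro f' hf' t m r S hT hM
      rw [dfsAList_cons, dfsMList_cons]
      obtain ⟨h12, h1r, E1, h1T, h1M⟩ := hL1 f' hf' c t m r S hT hM
      have hfle : (dfsA ch mq f' c (t, r)).2 ≤ f :=
        le_trans (dfsA_fuel_le ch mq f' c (t, r)) hf'
      rw [← h12]
      revert h1r h1T h1M
      generalize (dfsA ch mq f' c (t, r)).1 = x
      generalize (dfsM ch mq f' c (m, r)).1 = y
      obtain ⟨tx, rx⟩ := x
      obtain ⟨ty, ry⟩ := y
      intro h1r h1T h1M
      simp only at h1r h1T h1M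
      subst h1r
      obtain ⟨hq2, hqr, E2, hqT, hqM⟩ :=
        ihcs (dfsA ch mq f' c (t, r)).2 hfle tx ty rx (E1 ++ S) h1T h1M
      refine ⟨hq2, hqr, E2 ++ E1, ?_, ?_⟩
      · simpa [List.append_assoc] using hqT
      · simpa [List.append_assoc] using hqM

theorem MAbs_empty : MAbs PySem.Dict.empty [] := by
  intro i q _; rfl

theorem TAbs_zeroRoot : ∀ (k : Nat) (p : Int), TAbs k p (Trie.node .nil .nil 0) [] := by
  intro k p
  cases k with
  | zero => trivial
  | succ k =>
    exact ⟨⟨rfl, TAbs_nil [] (fun _ _ => rfl) k _⟩, rfl, TAbs_nil [] (fun _ _ => rfl) k _⟩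

theorem TAbs_root : TAbs 32 0 (Trie.node .nil .nil 0) [] := TAbs_zeroRoot 32 0

-- ===== VERDICT (by name: the statement is the Claim_ definition above) =====
theorem maxGeneticDifference_spec : Claim_equal_maxGeneticDifference := by
  intro parents queries _ _
  unfold Spec_maxGeneticDifference
  cases htop : (buildTree parents).2 with
  | none => simp only [maxGeneticDifference, maxGeneticDifference_alt, htop]
  | some top =>
    simp only [maxGeneticDifference, maxGeneticDifference_alt, htop]
    have hb := machineB_dfsMList (buildTree parents).1 (buildMq queries)
      (2 * parents.length + 2) [top] (2 * parents.length + 2) (le_refl _) []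
      (PySem.Dict.empty, List.replicate queries.length (0 : Int))
    simp only [List.map_cons, List.map_nil, List.singleton_append] at hb
    rw [hb, machineB_nil]
    obtain ⟨_, hres, _⟩ := dfsAM_list (buildTree parents).1 (buildMq queries)
      (2 * parents.length + 2) [top] (2 * parents.length + 2) (le_refl _)
      (Trie.node .nil .nil 0) PySem.Dict.empty (List.replicate queries.length (0 : Int))
      [] TAbs_root MAbs_empty
    rw [← hres, dfsAList_cons]
    simp [dfsAList]
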